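-- pv_equiv track=rewrite | github.com/davidbogo/Python_Projects | exercise1_316393974.py | find_srr
-- ===== SOURCE A (Python) =====
-- def find_srr(dna_seq):
--     ret_string = None
--     for short_seq_len in range(1, 7):  # we begin with sequences of 1 and end with 6
--         for start_index in range(0, len(dna_seq) - short_seq_len):
--             # we run through every sequence from the first letter to the last
--             short_seq = dna_seq[start_index:start_index + short_seq_len]  # the sequence we compare the next ones
--             counter = 1
--             for i in range(start_index + short_seq_len, len(dna_seq) + 1 - short_seq_len, short_seq_len):
--                 cur_seq = dna_seq[i:i + short_seq_len]  # the next sequences after short seq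
--                 if short_seq == cur_seq:  # we check whether the next sequence is equal to the previous
--                     counter += 1  # we add 1 to the counter if so
--                 if short_seq != cur_seq or i + short_seq_len * 2 > len(dna_seq):
--                     # we've reached the final count. Either we had a mismatch or the string is over
--                     if counter >= 3:  # if our next sequence doesn't equal to before, we check 3 or more for printing
--                         if ret_string:
--                             ret_string += ";"
--                         else:
--                             ret_string = ""
--                         ret_string += short_seq
--                         ret_string += ","
--                         ret_string += str(counter)
--                     break
--     return ret_string
-- ===== SOURCE B (Python) =====
-- def find_srr(dna_seq):
--     n = len(dna_seq)
--     parts = []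
--     for length in range(1, 7):
--         # cnt[i] = number of consecutive copies of dna_seq[i:i+length] starting at i
--         cnt = [1] * (n + 1)
--         for i in range(n - 2 * length, -1, -1):
--             if dna_seq[i:i + length] == dna_seq[i + length:i + 2 * length]:
--                 cnt[i] = cnt[i + length] + 1
--         for start in range(0, n - length):
--             if cnt[start] >= 3:
--                 parts.append(dna_seq[start:start + length] + "," + str(cnt[start]))
--     return ";".join(parts) if parts else None
-- ===== Notes on version B (the rewrite author's own statement) =====
-- stated objective: faster
-- what changed: Per-start rescanning of the repeat run (a nested loop per start index) is replaced by one reverse dynamic-programming pass per block length (cnt[i] = 1 + cnt[i+L] when adjacent blocks match) plus one collection pass, joining the collected parts at the end instead of threading the result string.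
import Mathlib
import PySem

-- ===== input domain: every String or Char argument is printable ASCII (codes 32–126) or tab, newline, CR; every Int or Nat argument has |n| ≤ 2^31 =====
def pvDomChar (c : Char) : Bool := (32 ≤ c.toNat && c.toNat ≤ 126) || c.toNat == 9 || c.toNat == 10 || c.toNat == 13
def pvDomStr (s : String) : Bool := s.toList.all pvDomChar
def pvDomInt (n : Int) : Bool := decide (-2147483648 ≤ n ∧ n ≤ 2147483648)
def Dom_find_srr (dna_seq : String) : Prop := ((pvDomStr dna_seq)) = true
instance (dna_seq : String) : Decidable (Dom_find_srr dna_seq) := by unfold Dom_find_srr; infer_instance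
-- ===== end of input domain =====

-- B replaces A's per-start rescan of the repeat run by one reverse DP pass per block length
-- (cnt[i] = 1 + cnt[i+L] when adjacent blocks match), an O(n) pass per length instead of A's
-- worst-case quadratic nested scan; same return value everywhere.

-- ===== PORT A =====
-- Python's 'if ret_string: ret_string += ";" else: ret_string = ""' prefix (None and "" falsy)
def prefA : Option (List Char) → List Char
  | some r => if r ≠ [] then r ++ [';'] else []
  | none => []

-- A's innermost 'for i in range(start+L, n+1-L, L)' with its break, threading counter and ret_string.
def innerA (s b : List Char) (L n : Int) : List Int → Int → Option (List Char) → Option (List Char)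
  | [], _, ret => ret
  | i :: rest, counter, ret =>
    let cur := PySem.List.slice s (some i) (some (i + L))
    let counter' := if b = cur then counter + 1 else counter
    if b ≠ cur ∨ i + L * 2 > n then
      (if counter' ≥ 3 then
        some (prefA ret ++ b ++ [','] ++ PySem.Int.toChars counter')
      else ret)
    else innerA s b L n rest counter' ret

def find_srr (dna_seq : String) : Option String :=
  let s := dna_seq.toList
  let n : Int := PySem.List.len s
  (((PySem.List.pyRange 1 7 1).foldl (fun ret L =>
      (PySem.List.pyRange 0 (n - L) 1).foldl (fun ret start =>
        innerA s (PySem.List.slice s (some start) (some (start + L))) L n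
          (PySem.List.pyRange (start + L) (n + 1 - L) L) 1 ret) ret)
    (none : Option (List Char)))).map (fun r => String.ofList r)

-- ===== PORT B =====
def find_srr_alt (dna_seq : String) : Option String :=
  let s := dna_seq.toList
  let n : Int := PySem.List.len s
  let parts := (PySem.List.pyRange 1 7 1).foldl (fun parts L =>
      let cnt := (PySem.List.pyRange (n - 2 * L) (-1) (-1)).foldl (fun cnt i =>
          if PySem.List.slice s (some i) (some (i + L)) =
             PySem.List.slice s (some (i + L)) (some (i + 2 * L)) then
            PySem.List.pySetD cnt i (PySem.List.pyGetD cnt (i + L) 0 + 1)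
          else cnt)
        (List.replicate (n + 1).toNat (1 : Int))
      (PySem.List.pyRange 0 (n - L) 1).foldl (fun parts start =>
          if PySem.List.pyGetD cnt start 0 ≥ 3 then
            parts ++ [PySem.List.slice s (some start) (some (start + L)) ++ [','] ++
                       PySem.Int.toChars (PySem.List.pyGetD cnt start 0)]
          else parts) parts)
    ([] : List (List Char))
  if parts = [] then none else some (String.ofList (PySem.Chars.join [';'] parts))

-- ===== PRECONDITION & SPEC =====
def Spec_find_srr (dna_seq : String) (out : Option String) : Prop := out = find_srr_alt dna_seq
instance (dna_seq : String) (out : Option String) : Decidable (Spec_find_srr dna_seq out) := by unfold Spec_find_srr; infer_instance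

-- ===== CLAIM (what is proved, stated in full; the proofs are below) =====
def Claim_equal_find_srr : Prop := ∀ (dna_seq : String), Dom_find_srr dna_seq → Spec_find_srr dna_seq (find_srr dna_seq)

-- ===== LEMMAS AND PROOFS =====

-- the block of length L starting at i
def pvBlock (s : List Char) (L i : Nat) : List Char := (s.drop i).take L

-- number of consecutive copies of the block at i (adjacent comparison, B's recurrence)
def pvRun (s : List Char) (L i : Nat) : Nat :=
  if h : 0 < L ∧ i + 2 * L ≤ s.length ∧ pvBlock s L i = pvBlock s L (i + L) then
    pvRun s L (i + L) + 1
  else 1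
termination_by s.length - i
decreasing_by omega

-- number of consecutive blocks equal to the fixed b starting at i (A's comparison)
def pvRunFix (s : List Char) (L : Nat) (b : List Char) (i : Nat) : Nat :=
  if h : 0 < L ∧ i + L ≤ s.length ∧ pvBlock s L i = b then
    pvRunFix s L b (i + L) + 1
  else 0
termination_by s.length - i
decreasing_by omega

def pvPartOpt (s : List Char) (L i : Nat) : Option (List Char) :=
  if 3 ≤ pvRun s L i then
    some (pvBlock s L i ++ [','] ++ PySem.Int.toChars (pvRun s L i))
  else none

def pvParts (s : List Char) (L : Nat) : List (List Char) :=
  (List.range (s.length - L)).filterMap (pvPartOpt s L)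

def pvStep (ret : Option (List Char)) (p : List Char) : Option (List Char) := some (prefA ret ++ p)

-- range(a, b, st) with 0 < st: cons decomposition
theorem pyRange_pos_cons (a b st : Int) (hst : 0 < st) (hab : a < b) :
    PySem.List.pyRange a b st = a :: PySem.List.pyRange (a + st) b st := by
  rw [PySem.List.pyRange_of_pos a b hst, PySem.List.pyRange_of_pos (a + st) b hst]
  rw [if_pos hab]
  have hN1 : 1 ≤ (b - a + st - 1) / st := by
    rw [Int.le_ediv_iff_mul_le hst]; omega
  by_cases h2 : a + st < b
  · rw [if_pos h2]
    have key : (b - (a + st) + st - 1) / st = (b - a + st - 1) / st - 1 := by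
      have h3 : b - (a + st) + st - 1 = b - a + st - 1 + -1 * st := by ring
      rw [h3, Int.add_mul_ediv_right _ _ (by omega : st ≠ 0)]; ring
    rw [key]
    have hNt : ((b - a + st - 1) / st).toNat = ((b - a + st - 1) / st - 1).toNat + 1 := by omega
    rw [hNt, List.range_succ_eq_map]
    simp only [List.map_cons, List.map_map]
    refine List.cons_eq_cons.mpr ⟨by simp, ?_⟩
    apply List.map_congr_left
    intro k _
    simp [Nat.succ_eq_add_one]
    ring
  · rw [if_neg h2]
    have hlt : (b - a + st - 1) / st < 2 := by
      rw [Int.ediv_lt_iff_lt_mul hst]; omega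
    have hone : ((b - a + st - 1) / st).toNat = 1 := by omega
    simp [hone, List.range_succ]

theorem pyRange_pos_nil (a b st : Int) (hst : 0 < st) (hab : b ≤ a) :
    PySem.List.pyRange a b st = [] := by
  rw [PySem.List.pyRange_of_pos a b hst]
  simp [if_neg (not_lt.mpr hab)]

-- characterisation of A's inner loop
theorem inner_eq (s b : List Char) (L : Nat) (hL : 0 < L) :
    ∀ (m i : Nat) (c : Int) (ret : Option (List Char)), s.length - i ≤ m →
    innerA s b (L : Int) (s.length : Int)
      (PySem.List.pyRange (i : Int) ((s.length : Int) + 1 - (L : Int)) (L : Int)) c ret =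
    if i + L ≤ s.length then
      (if c + (pvRunFix s L b i : Int) ≥ 3 then
        some (prefA ret ++ b ++ [','] ++ PySem.Int.toChars (c + (pvRunFix s L b i : Int)))
      else ret)
    else ret := by
  intro m
  induction m with
  | zero =>
    intro i c ret hm
    have h : ¬ (i + L ≤ s.length) := by omega
    rw [pyRange_pos_nil _ _ _ (by exact_mod_cast hL) (by omega), if_neg h]
    rfl
  | succ m ih =>
    intro i c ret hm
    by_cases h : i + L ≤ s.length
    · have hlt : (i : Int) < (s.length : Int) + 1 - (L : Int) := by omega
      rw [pyRange_pos_cons _ _ _ (by exact_mod_cast hL) hlt, if_pos h]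
      rw [innerA]
      simp only [PySem.List.slice_natCast_add s i L]
      rw [show List.take L (List.drop i s) = pvBlock s L i from rfl]
      by_cases heq : b = pvBlock s L i
      · rw [if_pos heq]
        have hfix : pvRunFix s L b i = pvRunFix s L b (i + L) + 1 := by
          rw [pvRunFix, dif_pos ⟨hL, h, heq.symm⟩]
        by_cases hend : i + 2 * L ≤ s.length
        · have hbr : ¬ (b ≠ pvBlock s L i ∨ (i : Int) + (L : Int) * 2 > (s.length : Int)) := by
            push Not
            exact ⟨heq, by omega⟩
          rw [if_neg hbr]
          have hcast : (i : Int) + (L : Int) = ((i + L : Nat) : Int) := by push_cast; ring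
          rw [hcast]
          rw [ih (i + L) (c + 1) ret (by omega)]
          rw [if_pos (by omega : i + L + L ≤ s.length)]
          rw [hfix]
          push_cast
          ring_nf
        · have hbr : (b ≠ pvBlock s L i ∨ (i : Int) + (L : Int) * 2 > (s.length : Int)) := by
            right; omega
          rw [if_pos hbr]
          have hz : pvRunFix s L b (i + L) = 0 := by
            rw [pvRunFix, dif_neg]
            intro ⟨_, h1, _⟩
            omega
          rw [hfix, hz]
          norm_num
      · rw [if_neg heq]
        have hbr : (b ≠ pvBlock s L i ∨ (i : Int) + (L : Int) * 2 > (s.length : Int)) := by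
          left; exact heq
        rw [if_pos hbr]
        have hz : pvRunFix s L b i = 0 := by
          rw [pvRunFix, dif_neg]
          intro ⟨_, _, h2⟩
          exact heq h2.symm
        rw [hz]
        norm_num
    · rw [pyRange_pos_nil _ _ _ (by exact_mod_cast hL) (by omega), if_neg h]
      rfl

-- A's fixed-block count equals B's adjacent-block count
theorem runFix_eq_run (s : List Char) (L : Nat) (hL : 0 < L) :
    ∀ (m i : Nat), s.length - i ≤ m → i + L ≤ s.length →
    pvRunFix s L (pvBlock s L i) i = pvRun s L i := by
  intro m
  induction m with
  | zero => intro i hm hi; omega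
  | succ m ih =>
    intro i hm hi
    rw [pvRunFix, pvRun]
    rw [dif_pos ⟨hL, hi, rfl⟩]
    by_cases hc : i + 2 * L ≤ s.length ∧ pvBlock s L i = pvBlock s L (i + L)
    · rw [dif_pos ⟨hL, hc.1, hc.2⟩]
      have := ih (i + L) (by omega) (by omega)
      rw [← hc.2] at this
      rw [this]
    · rw [dif_neg (by tauto)]
      have hz : pvRunFix s L (pvBlock s L i) (i + L) = 0 := by
        rw [pvRunFix]
        rw [dif_neg]
        intro ⟨_, h1, h2⟩
        exact hc ⟨by omega, h2.symm⟩
      rw [hz]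

-- A's per-start step
theorem stepA_eq (s : List Char) (L : Nat) (hL : 0 < L) (start : Nat)
    (hs : start + L < s.length) (ret : Option (List Char)) :
    innerA s (pvBlock s L start) (L : Int) (s.length : Int)
      (PySem.List.pyRange ((start : Int) + (L : Int)) ((s.length : Int) + 1 - (L : Int)) (L : Int))
      1 ret =
    (pvPartOpt s L start).elim ret (pvStep ret) := by
  rw [show (start : Int) + (L : Int) = ((start + L : Nat) : Int) from by push_cast; ring]
  rw [inner_eq s (pvBlock s L start) L hL s.length (start + L) 1 ret (by omega)]
  by_cases hend : start + 2 * L ≤ s.length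
  · rw [if_pos (by omega : start + L + L ≤ s.length)]
    have hfix : pvRunFix s L (pvBlock s L start) start =
        pvRunFix s L (pvBlock s L start) (start + L) + 1 := by
      rw [pvRunFix, dif_pos ⟨hL, by omega, rfl⟩]
    have hrun := runFix_eq_run s L hL s.length start (by omega) (by omega)
    have hval : (1 : Int) + (pvRunFix s L (pvBlock s L start) (start + L) : Int) =
        ((pvRun s L start : Nat) : Int) := by
      rw [← hrun, hfix]; push_cast; ring
    rw [pvPartOpt]
    by_cases h3 : 3 ≤ pvRun s L start
    · rw [if_pos h3, if_pos (by rw [hval]; exact_mod_cast h3)]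
      rw [hval]
      simp [pvStep, List.append_assoc]
    · rw [if_neg h3, if_neg (by rw [hval]; intro hc; exact h3 (by exact_mod_cast hc))]
      rfl
  · rw [if_neg (by omega : ¬ (start + L + L ≤ s.length))]
    have hrun1 : pvRun s L start = 1 := by
      rw [pvRun, dif_neg]
      intro ⟨_, h1, _⟩
      omega
    rw [pvPartOpt, hrun1]
    norm_num

theorem foldl_elim_filterMap {α : Type} (f : α → Option (List Char)) :
    ∀ (l : List α) (ret : Option (List Char)),
    l.foldl (fun r x => (f x).elim r (pvStep r)) ret = (l.filterMap f).foldl pvStep ret := by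
  intro l
  induction l with
  | nil => intro ret; simp
  | cons x xs ih =>
    intro ret
    cases h : f x <;> simp [List.foldl_cons, h, ih]

-- A's per-length loop
theorem perL_A (s : List Char) (L : Nat) (hL : 0 < L) (ret : Option (List Char)) :
    (PySem.List.pyRange 0 ((s.length : Int) - (L : Int)) 1).foldl (fun ret start =>
        innerA s (PySem.List.slice s (some start) (some (start + (L : Int)))) (L : Int)
          (s.length : Int)
          (PySem.List.pyRange (start + (L : Int)) ((s.length : Int) + 1 - (L : Int)) (L : Int))
          1 ret) ret =
    (pvParts s L).foldl pvStep ret := by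
  rw [PySem.List.pyRange_one, List.foldl_map]
  have htn : ((s.length : Int) - (L : Int) - 0).toNat = s.length - L := by omega
  rw [htn]
  rw [PySem.List.foldl_congr_mem _ _
      (fun ret k => (pvPartOpt s L k).elim ret (pvStep ret)) ret ?_]
  · rw [foldl_elim_filterMap]
    rfl
  · intro acc x hx
    rw [List.mem_range] at hx
    simp only [zero_add]
    rw [PySem.List.slice_natCast_add s x L,
        show List.take L (List.drop x s) = pvBlock s L x from rfl]
    exact stepA_eq s L hL x (by omega) acc

-- invariant of B's reverse DP loop
theorem cnt_inv (s : List Char) (L : Nat) (hL : 0 < L) :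
    ∀ (m : Nat) (k : Int) (cnt : List Int), (k + 1).toNat ≤ m →
    k ≤ (s.length : Int) - 2 * (L : Int) →
    cnt.length = s.length + 1 →
    (∀ j : Nat, j ≤ s.length → cnt.getD j 0 = if k < (j : Int) then (pvRun s L j : Int) else 1) →
    ∀ j : Nat, j ≤ s.length →
    ((PySem.List.pyRange k (-1) (-1)).foldl (fun cnt i =>
        if PySem.List.slice s (some i) (some (i + (L : Int))) =
           PySem.List.slice s (some (i + (L : Int))) (some (i + 2 * (L : Int))) then
          PySem.List.pySetD cnt i (PySem.List.pyGetD cnt (i + (L : Int)) 0 + 1)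
        else cnt) cnt).getD j 0 = (pvRun s L j : Int) := by
  intro m
  induction m with
  | zero =>
    intro k cnt hm hk hlen hinv j hj
    have hkneg : k < 0 := by omega
    rw [PySem.List.pyRange_neg_one_eq_nil (by omega : k ≤ -1), List.foldl_nil]
    rw [hinv j hj, if_pos (by omega)]
  | succ m ih =>
    intro k cnt hm hk hlen hinv j hj
    by_cases hkneg : k < 0
    · rw [PySem.List.pyRange_neg_one_eq_nil (by omega : k ≤ -1), List.foldl_nil]
      rw [hinv j hj, if_pos (by omega)]
    · have hk0 : 0 ≤ k := by omega
      set kn := k.toNat with hkn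
      have hkc : k = (kn : Int) := by omega
      have hkl : kn + 2 * L ≤ s.length := by omega
      rw [PySem.List.pyRange_neg_one_cons (by omega : (-1 : Int) < k), List.foldl_cons]
      have hstep :
          (if PySem.List.slice s (some k) (some (k + (L : Int))) =
              PySem.List.slice s (some (k + (L : Int))) (some (k + 2 * (L : Int))) then
            PySem.List.pySetD cnt k (PySem.List.pyGetD cnt (k + (L : Int)) 0 + 1)
          else cnt) =
          (if pvBlock s L kn = pvBlock s L (kn + L) then
            cnt.set kn (cnt.getD (kn + L) 0 + 1)
          else cnt) := by
        rw [hkc]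
        rw [show ((kn : Int) + (L : Int)) = ((kn + L : Nat) : Int) from by push_cast; ring,
            show ((kn : Int) + 2 * (L : Int)) = (((kn + L : Nat)) : Int) + (L : Int) from by
              push_cast; ring]
        rw [show PySem.List.slice s (some ((kn : Int))) (some ((kn + L : Nat) : Int)) =
              pvBlock s L kn from by
            rw [show ((kn + L : Nat) : Int) = ((kn : Int) + (L : Int)) from by push_cast; ring]
            rw [PySem.List.slice_natCast_add s kn L]; rfl]
        rw [PySem.List.slice_natCast_add s (kn + L) L,
            show List.take L (List.drop (kn + L) s) = pvBlock s L (kn + L) from rfl]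
        rw [PySem.List.pySetD_natCast, PySem.List.pyGetD_natCast]
      rw [hstep]
      have hrun_eq : pvBlock s L kn = pvBlock s L (kn + L) →
          pvRun s L kn = pvRun s L (kn + L) + 1 := by
        intro he
        rw [pvRun, dif_pos ⟨hL, by omega, he⟩]
      have hrun_one : ¬ pvBlock s L kn = pvBlock s L (kn + L) → pvRun s L kn = 1 := by
        intro he
        rw [pvRun, dif_neg (by tauto)]
      by_cases he : pvBlock s L kn = pvBlock s L (kn + L)
      · rw [if_pos he]
        refine ih (k - 1) _ (by omega) (by omega) (by simp [hlen]) ?_ j hj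
        intro j' hj'
        rw [List.getD_eq_getElem?_getD, List.getElem?_set]
        by_cases hjk : kn = j'
        · subst hjk
          rw [if_pos rfl, if_pos (by omega), if_pos (by omega)]
          simp only [Option.getD_some]
          rw [hinv (kn + L) (by omega), if_pos (by omega), hrun_eq he]
          push_cast; ring
        · rw [if_neg hjk, ← List.getD_eq_getElem?_getD, hinv j' hj']
          by_cases hlt : k - 1 < (j' : Int)
          · rw [if_pos (by omega), if_pos hlt]
          · rw [if_neg (by omega), if_neg hlt]
      · rw [if_neg he]
        refine ih (k - 1) _ (by omega) (by omega) hlen ?_ j hj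
        intro j' hj'
        rw [hinv j' hj']
        by_cases hjk : (j' : Int) = k
        · rw [if_neg (by omega), if_pos (by omega), show j' = kn from by omega,
              hrun_one he]
          norm_num
        · by_cases hlt : k - 1 < (j' : Int)
          · rw [if_pos (by omega), if_pos hlt]
          · rw [if_neg (by omega), if_neg hlt]

-- B's cnt array
theorem cnt_spec (s : List Char) (L : Nat) (hL : 0 < L) :
    ∀ (j : Nat), j ≤ s.length →
    ((PySem.List.pyRange ((s.length : Int) - 2 * (L : Int)) (-1) (-1)).foldl (fun cnt i =>
        if PySem.List.slice s (some i) (some (i + (L : Int))) =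
           PySem.List.slice s (some (i + (L : Int))) (some (i + 2 * (L : Int))) then
          PySem.List.pySetD cnt i (PySem.List.pyGetD cnt (i + (L : Int)) 0 + 1)
        else cnt)
      (List.replicate (((s.length : Int) + 1).toNat) (1 : Int))).getD j 0 = (pvRun s L j : Int) := by
  intro j hj
  refine cnt_inv s L hL (((s.length : Int) - 2 * (L : Int)) + 1).toNat _ _ le_rfl le_rfl
    (by simp) ?_ j hj
  intro j' hj'
  rw [List.getD_replicate _ (by omega)]
  by_cases hlt : (s.length : Int) - 2 * (L : Int) < (j' : Int)
  · rw [if_pos hlt]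
    rw [pvRun, dif_neg (by intro ⟨_, h1, _⟩; omega)]
    norm_num
  · rw [if_neg hlt]

theorem foldl_append_ite {α : Type} (P : α → Prop) [DecidablePred P] (f : α → List Char) :
    ∀ (l : List α) (acc : List (List Char)),
    l.foldl (fun acc x => if P x then acc ++ [f x] else acc) acc =
      acc ++ l.filterMap (fun x => if P x then some (f x) else none) := by
  intro l
  induction l with
  | nil => intro acc; simp
  | cons x xs ih =>
    intro acc
    by_cases h : P x <;> simp [List.foldl_cons, h, ih]

theorem perL_B' (s : List Char) (L : Nat) (hL : 0 < L) (cnt : List Int)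
    (hcnt : ∀ j : Nat, j ≤ s.length → cnt.getD j 0 = (pvRun s L j : Int))
    (parts : List (List Char)) :
    (PySem.List.pyRange 0 ((s.length : Int) - (L : Int)) 1).foldl (fun parts start =>
        if PySem.List.pyGetD cnt start 0 ≥ 3 then
          parts ++ [PySem.List.slice s (some start) (some (start + (L : Int))) ++ [','] ++
                     PySem.Int.toChars (PySem.List.pyGetD cnt start 0)]
        else parts) parts =
    parts ++ pvParts s L := by
  rw [PySem.List.pyRange_one, List.foldl_map]
  have htn : ((s.length : Int) - (L : Int) - 0).toNat = s.length - L := by omega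
  rw [htn]
  rw [foldl_append_ite (fun k : Nat => PySem.List.pyGetD cnt ((0 : Int) + (k : Int)) 0 ≥ 3)
      (fun k : Nat => PySem.List.slice s (some ((0 : Int) + (k : Int)))
          (some ((0 : Int) + (k : Int) + (L : Int))) ++ [','] ++
        PySem.Int.toChars (PySem.List.pyGetD cnt ((0 : Int) + (k : Int)) 0))]
  rw [pvParts]
  congr 1
  apply List.filterMap_congr
  intro x hx
  rw [List.mem_range] at hx
  simp only [zero_add, PySem.List.pyGetD_natCast]
  rw [hcnt x (by omega)]
  rw [PySem.List.slice_natCast_add s x L,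
      show List.take L (List.drop x s) = pvBlock s L x from rfl]
  rw [pvPartOpt]
  by_cases h3 : 3 ≤ pvRun s L x
  · rw [if_pos (by exact_mod_cast h3), if_pos h3]
  · rw [if_neg (by intro hc; exact h3 (by exact_mod_cast hc)), if_neg h3]

-- B's per-length loop
theorem perL_B (s : List Char) (L : Nat) (hL : 0 < L) (parts : List (List Char)) :
    (let cnt := (PySem.List.pyRange ((s.length : Int) - 2 * (L : Int)) (-1) (-1)).foldl
        (fun cnt i =>
          if PySem.List.slice s (some i) (some (i + (L : Int))) =
             PySem.List.slice s (some (i + (L : Int))) (some (i + 2 * (L : Int))) then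
            PySem.List.pySetD cnt i (PySem.List.pyGetD cnt (i + (L : Int)) 0 + 1)
          else cnt)
        (List.replicate (((s.length : Int) + 1).toNat) (1 : Int));
      (PySem.List.pyRange 0 ((s.length : Int) - (L : Int)) 1).foldl (fun parts start =>
          if PySem.List.pyGetD cnt start 0 ≥ 3 then
            parts ++ [PySem.List.slice s (some start) (some (start + (L : Int))) ++ [','] ++
                       PySem.Int.toChars (PySem.List.pyGetD cnt start 0)]
          else parts) parts) =
    parts ++ pvParts s L := by
  refine perL_B' s L hL _ ?_ parts
  intro j hj
  exact cnt_spec s L hL j hj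

theorem glue_some (ps : List (List Char)) :
    ∀ (r : List Char), r ≠ [] →
    ps.foldl pvStep (some r) = some (PySem.Chars.join [';'] (r :: ps)) := by
  induction ps with
  | nil => intro r _; simp [PySem.Chars.join_singleton]
  | cons p ps ih =>
    intro r hr
    rw [List.foldl_cons]
    have hstep : pvStep (some r) p = some (r ++ [';'] ++ p) := by
      simp [pvStep, prefA, hr]
    rw [hstep, ih (r ++ [';'] ++ p) (by simp), PySem.Chars.join_cons_cons]
    cases ps with
    | nil => simp [PySem.Chars.join_singleton]
    | cons q qs => rw [PySem.Chars.join_cons_cons, PySem.Chars.join_cons_cons]; simp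

theorem parts_ne_nil (s : List Char) (L : Nat) : ∀ p ∈ pvParts s L, p ≠ [] := by
  intro p hp
  simp only [pvParts, List.mem_filterMap] at hp
  obtain ⟨i, _, hi⟩ := hp
  simp only [pvPartOpt] at hi
  split at hi
  · cases hi; simp
  · cases hi

theorem glue (ps : List (List Char)) (h : ∀ p ∈ ps, p ≠ []) :
    ps.foldl pvStep none =
      if ps = [] then none else some (PySem.Chars.join [';'] ps) := by
  cases ps with
  | nil => simp
  | cons p t =>
    rw [List.foldl_cons]
    have hstep : pvStep none p = some p := by simp [pvStep, prefA]
    rw [hstep, glue_some t p (h p (by simp))]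
    simp

theorem perL_A_int (s : List Char) (L : Int) (hL : 0 < L) (ret : Option (List Char)) :
    (PySem.List.pyRange 0 ((s.length : Int) - L) 1).foldl (fun ret start =>
        innerA s (PySem.List.slice s (some start) (some (start + L))) L (s.length : Int)
          (PySem.List.pyRange (start + L) ((s.length : Int) + 1 - L) L) 1 ret) ret =
    (pvParts s L.toNat).foldl pvStep ret := by
  obtain ⟨Ln, rfl⟩ : ∃ Ln : Nat, L = (Ln : Int) := ⟨L.toNat, by omega⟩
  rw [Int.toNat_natCast]
  exact perL_A s Ln (by exact_mod_cast hL) ret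

theorem perL_B_int (s : List Char) (L : Int) (hL : 0 < L) (parts : List (List Char)) :
    (let cnt := (PySem.List.pyRange ((s.length : Int) - 2 * L) (-1) (-1)).foldl
        (fun cnt i =>
          if PySem.List.slice s (some i) (some (i + L)) =
             PySem.List.slice s (some (i + L)) (some (i + 2 * L)) then
            PySem.List.pySetD cnt i (PySem.List.pyGetD cnt (i + L) 0 + 1)
          else cnt)
        (List.replicate (((s.length : Int) + 1).toNat) (1 : Int));
      (PySem.List.pyRange 0 ((s.length : Int) - L) 1).foldl (fun parts start =>
          if PySem.List.pyGetD cnt start 0 ≥ 3 then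
            parts ++ [PySem.List.slice s (some start) (some (start + L)) ++ [','] ++
                       PySem.Int.toChars (PySem.List.pyGetD cnt start 0)]
          else parts) parts) =
    parts ++ pvParts s L.toNat := by
  obtain ⟨Ln, rfl⟩ : ∃ Ln : Nat, L = (Ln : Int) := ⟨L.toNat, by omega⟩
  rw [Int.toNat_natCast]
  exact perL_B s Ln (by exact_mod_cast hL) parts

-- ===== VERDICT (by name: the statement is the Claim_ definition above) =====
theorem find_srr_spec : Claim_equal_find_srr := by
  intro dna _
  show find_srr dna = find_srr_alt dna
  simp only [find_srr, find_srr_alt, PySem.List.len_eq]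
  rw [show PySem.List.pyRange 1 7 1 = [1, 2, 3, 4, 5, 6] from by decide]
  simp only [List.foldl_cons, List.foldl_nil]
  rw [perL_A_int dna.toList 1 (by norm_num), perL_A_int dna.toList 2 (by norm_num),
      perL_A_int dna.toList 3 (by norm_num), perL_A_int dna.toList 4 (by norm_num),
      perL_A_int dna.toList 5 (by norm_num), perL_A_int dna.toList 6 (by norm_num)]
  rw [perL_B_int dna.toList 1 (by norm_num), perL_B_int dna.toList 2 (by norm_num),
      perL_B_int dna.toList 3 (by norm_num), perL_B_int dna.toList 4 (by norm_num),
      perL_B_int dna.toList 5 (by norm_num), perL_B_int dna.toList 6 (by norm_num)]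
  rw [← List.foldl_append, ← List.foldl_append, ← List.foldl_append, ← List.foldl_append,
      ← List.foldl_append]
  simp only [List.nil_append, List.append_assoc]
  set ps := pvParts dna.toList (1 : Int).toNat ++ (pvParts dna.toList (2 : Int).toNat ++
    (pvParts dna.toList (3 : Int).toNat ++ (pvParts dna.toList (4 : Int).toNat ++
    (pvParts dna.toList (5 : Int).toNat ++ pvParts dna.toList (6 : Int).toNat)))) with hps
  have hne : ∀ p ∈ ps, p ≠ [] := by
    intro p hp
    rw [hps] at hp
    simp only [List.mem_append] at hp
    rcases hp with h | h | h | h | h | h <;> exact parts_ne_nil _ _ p h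
  rw [glue ps hne]
  by_cases h : ps = []
  · simp [h]
  · simp [h]
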